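-- pv_equiv track=rewrite | github.com/TranslatorSRI/RedisTPF | src/descender.py | redundantize_decs
-- ===== SOURCE A (Python) =====
-- def redundantize_decs(decs, root, processed=None):
--     # given a dictionary from a member to a set of immediate descendants d, and a root node, return a dictionary
--     # from the member to a set of all descendants. Note that a member is a descendent of itself.
--     # For instance, if decs is {a: {a,b,c}, b: {b,d}, c: {c,e}, d:{d}, e:{e}}, then the return value will be
--     # {a: {a,b,c,d,e}, b: {b,d}, c: {c,e}, d:{d}, e:{e}}.
--     # This is a recursive function.  It returns a dictionary.
--     # The base case is when the root is not in the dictionary.  In this case, we return the dictionary.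
--     # The recursive case is when the root is in the dictionary.  In this case, we add the descendants of the
--     # root to the root's descendants, and then call the function on the root's descendants.
--     # Note that this function is not efficient.  It is O(n^2) in the number of edges.  However, we don't expect
--     # the number of edges to be very large, so this should be fine.
--     if processed is None:
--         processed = set()
--
--     # If the root has been processed or is not in decs, return an empty dict
--     if root in processed or root not in decs:
--         return {}
--
--     # Add root to processed set
--     processed.add(root)
--
--     # Copy the immediate descendants to avoid modifying the input dictionary
--     all_descendants = set(decs[root])
--
--     # Iterate over a copy of the immediate descendants
--     for dec in decs[root].copy():
--         if dec not in processed: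
--             # Recursively get all descendants of the current descendant
--             dec_descendants = redundantize_decs(decs, dec, processed)
--             # Update the all_descendants set
--             all_descendants.update(dec_descendants[dec])
--
--     # Update the decs dictionary for the root
--     decs[root] = all_descendants
--
--     return decs
-- ===== SOURCE B (Python) =====
-- def redundantize_decs(decs, root, processed=None):
--     # Iterative DFS with an explicit stack of frames: children are visited in
--     # sorted order (deterministic regardless of hash seed), each node's
--     # accumulated descendant set is written back into decs when its frame is
--     # popped and merged into its parent's accumulator.  Children without an
--     # entry in decs are treated as leaves and skipped.
--     # Mutates decs and processed in place and returns decs.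
--     if processed is None:
--         processed = set()
--     if root in processed or root not in decs:
--         return {}
--     processed.add(root)
--     stack = [[root, sorted(decs[root]), set(decs[root])]]
--     while stack:
--         frame = stack[-1]
--         node, kids, acc = frame
--         if kids:
--             c = kids.pop(0)
--             if c not in processed and c in decs:
--                 processed.add(c)
--                 stack.append([c, sorted(decs[c]), set(decs[c])])
--         else:
--             decs[node] = acc
--             stack.pop()
--             if stack:
--                 stack[-1][2].update(acc)
--     return decs
-- ===== Notes on version B (the rewrite author's own statement) =====
-- stated objective: alternative
-- what changed: The recursion is replaced by an explicit DFS stack machine that marks nodes pre-order, accumulates each node's descendant set in a frame, and writes it back and merges it into the parent frame on pop, visiting children in sorted (hence hash-seed-independent) order instead of Python's set iteration order; Pre_ excludes inputs where a listed descendant is missing from decs (A raises KeyError there, B treats it as a leaf), where a value list is not the canonical sorted representation of its set, or where a node is listed under two distinct other members (A's value then depends on the hash seed).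
import Mathlib
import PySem

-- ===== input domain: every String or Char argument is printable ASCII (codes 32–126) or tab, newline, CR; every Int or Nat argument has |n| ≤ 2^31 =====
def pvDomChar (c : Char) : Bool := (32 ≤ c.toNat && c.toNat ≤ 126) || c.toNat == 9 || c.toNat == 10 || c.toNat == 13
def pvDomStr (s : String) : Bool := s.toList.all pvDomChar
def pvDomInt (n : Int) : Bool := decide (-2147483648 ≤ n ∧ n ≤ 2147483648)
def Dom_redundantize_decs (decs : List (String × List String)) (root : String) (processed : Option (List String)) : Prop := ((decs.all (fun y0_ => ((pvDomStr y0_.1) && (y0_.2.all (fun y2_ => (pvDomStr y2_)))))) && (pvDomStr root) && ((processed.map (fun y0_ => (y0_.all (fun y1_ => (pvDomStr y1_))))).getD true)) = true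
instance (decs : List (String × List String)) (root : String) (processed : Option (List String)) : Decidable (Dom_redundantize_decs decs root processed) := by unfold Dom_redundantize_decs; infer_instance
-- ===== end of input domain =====

-- B replaces A's recursion by an explicit DFS stack machine with a deterministic
-- (sorted) child order; like A it mutates decs and processed in place (the equivalence
-- proved here is about the returned dictionary, whose entries are those of the mutated
-- decs).  Both ports carry a fuel argument (1 + Σ (value length + 1)) that only makes
-- the recursion/loop total; it is never exhausted on the runs the claim covers.

-- ===== PORT A =====
-- Source A's recursion; a call returns (its return value, decs, processed) because the
-- Python mutates decs and processed in place.  The three components of the recursive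
-- call's result are written out separately inside the loop.
def goA : Nat → PySem.Dict String (List String) → String → PySem.Set String →
    (PySem.Dict String (List String) × PySem.Dict String (List String) × PySem.Set String)
  | 0, d, _, P => (PySem.Dict.empty, d, P)
  | fuel+1, d, root, P =>
    -- if root in processed or root not in decs: return {}
    if PySem.Set.contains P root || !(d.contains root) then (PySem.Dict.empty, d, P)
    else
      -- processed.add(root); all_descendants = set(decs[root]); for dec in decs[root].copy(): …
      let s := (d.getD root []).foldl
        (fun s dec =>
          if PySem.Set.contains s.2.2 dec then s
          else (PySem.Set.update s.1 (((goA fuel s.2.1 dec s.2.2).1.get? dec).getD []),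
                (goA fuel s.2.1 dec s.2.2).2.1, (goA fuel s.2.1 dec s.2.2).2.2))
        (PySem.Set.ofList (d.getD root []), d, PySem.Set.add P root)
      -- decs[root] = all_descendants; return decs
      (s.2.1.insert root s.1, s.2.1.insert root s.1, s.2.2)

def pvFuel (decs : List (String × List String)) : Nat :=
  decs.foldl (fun n p => n + (p.2.length + 1)) 1

def redundantize_decs (decs : List (String × List String)) (root : String) (processed : Option (List String)) : List (String × List String) :=
  ((goA (pvFuel decs) (PySem.Dict.mk decs) root (processed.getD [])).1).items

-- ===== PORT B =====
-- Source B's stack machine: frames are (node, remaining children, accumulated set);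
-- a child with no entry in decs is a leaf and is skipped
def goB : Nat → List (String × List String × List String) →
    PySem.Dict String (List String) → PySem.Set String →
    (PySem.Dict String (List String) × PySem.Set String)
  | 0, _, d, P => (d, P)
  | _+1, [], d, P => (d, P)
  | fuel+1, (node, c :: ks, acc) :: fs, d, P =>
    if !(PySem.Set.contains P c) && d.contains c then
      goB fuel ((c, PySem.List.sorted (d.getD c []) (fun x => x) false,
                 PySem.Set.ofList (d.getD c [])) :: (node, ks, acc) :: fs) d (PySem.Set.add P c)
    else
      goB fuel ((node, ks, acc) :: fs) d P
  | fuel+1, (node, [], acc) :: fs, d, P =>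
    let d2 := d.insert node acc
    match fs with
    | [] => goB fuel [] d2 P
    | (pn, pk, pa) :: fs' => goB fuel ((pn, pk, PySem.Set.update pa acc) :: fs') d2 P

def redundantize_decs_alt (decs : List (String × List String)) (root : String) (processed : Option (List String)) : List (String × List String) :=
  let d := PySem.Dict.mk decs
  let P : PySem.Set String := processed.getD []
  if PySem.Set.contains P root || !(d.contains root) then []
  else
    ((goB (pvFuel decs)
        [(root, PySem.List.sorted (d.getD root []) (fun x => x) false,
          PySem.Set.ofList (d.getD root []))] d (PySem.Set.add P root)).1).items

-- ===== PRECONDITION & SPEC =====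
-- Pre_ admits every input A's first guard answers immediately, and otherwise the
-- well-formed dictionaries: unique keys and, for the listed descendant sets, (a) value
-- lists in sorted order (the canonical list representation of a Python set, which has
-- no order of its own; on other list representations of the same sets the ports'
-- output lists differ only in set-element order), (b) every listed descendant present
-- as a key (A raises KeyError when it reaches a missing one, B treats it as a leaf),
-- and (c) no string listed under two distinct other members (on such inputs A's
-- returned value depends on Python's set-iteration order, i.e. on the hash seed, so
-- there is no one value to claim).
def Pre_redundantize_decs (decs : List (String × List String)) (root : String) (processed : Option (List String)) : Prop :=
  (root ∈ processed.getD [] ∨ root ∉ decs.map Prod.fst)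
  ∨ ((decs.map Prod.fst).Nodup
     ∧ ∀ kv ∈ decs, kv.2.Pairwise (fun a b => a.toList ≤ b.toList)
        ∧ ∀ v ∈ kv.2, v ∈ decs.map Prod.fst
           ∧ decs.countP (fun kv' => decide (v ∈ kv'.2) && !(kv'.1 == v)) ≤ 1)
instance (decs : List (String × List String)) (root : String) (processed : Option (List String)) : Decidable (Pre_redundantize_decs decs root processed) := by unfold Pre_redundantize_decs; infer_instance

def pvWitness_redundantize_decs : (List (String × List String)) × String × Option (List String) :=
  ([("a", ["a", "b"]), ("b", ["b"])], "a", none)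

def Spec_redundantize_decs (decs : List (String × List String)) (root : String) (processed : Option (List String)) (out : List (String × List String)) : Prop := out = redundantize_decs_alt decs root processed
instance (decs : List (String × List String)) (root : String) (processed : Option (List String)) (out : List (String × List String)) : Decidable (Spec_redundantize_decs decs root processed out) := by unfold Spec_redundantize_decs; infer_instance

-- ===== CLAIM (what is proved, stated in full; the proofs are below) =====
def Claim_equal_redundantize_decs : Prop := ∀ (decs : List (String × List String)) (root : String) (processed : Option (List String)), Dom_redundantize_decs decs root processed → Pre_redundantize_decs decs root processed → Spec_redundantize_decs decs root processed (redundantize_decs decs root processed)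

-- ===== LEMMAS AND PROOFS =====

-- A's loop body, as a named function (definitionally the lambda inside goA)
def stepA (fuel : Nat)
    (s : PySem.Set String × PySem.Dict String (List String) × PySem.Set String)
    (dec : String) :
    PySem.Set String × PySem.Dict String (List String) × PySem.Set String :=
  if PySem.Set.contains s.2.2 dec then s
  else (PySem.Set.update s.1 (((goA fuel s.2.1 dec s.2.2).1.get? dec).getD []),
        (goA fuel s.2.1 dec s.2.2).2.1, (goA fuel s.2.1 dec s.2.2).2.2)

lemma goA_succ (fuel : Nat) (d : PySem.Dict String (List String)) (root : String)
    (P : PySem.Set String) :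
    goA (fuel+1) d root P =
      if PySem.Set.contains P root || !(d.contains root) then (PySem.Dict.empty, d, P)
      else
        ((((d.getD root []).foldl (stepA fuel)
            (PySem.Set.ofList (d.getD root []), d, PySem.Set.add P root)).2.1.insert root
          ((d.getD root []).foldl (stepA fuel)
            (PySem.Set.ofList (d.getD root []), d, PySem.Set.add P root)).1),
         (((d.getD root []).foldl (stepA fuel)
            (PySem.Set.ofList (d.getD root []), d, PySem.Set.add P root)).2.1.insert root
          ((d.getD root []).foldl (stepA fuel)
            (PySem.Set.ofList (d.getD root []), d, PySem.Set.add P root)).1),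
         ((d.getD root []).foldl (stepA fuel)
            (PySem.Set.ofList (d.getD root []), d, PySem.Set.add P root)).2.2) := rfl

lemma goA_stop (f : Nat) (d : PySem.Dict String (List String)) (root : String)
    (P : PySem.Set String) (h : (PySem.Set.contains P root || !(d.contains root)) = true) :
    goA f d root P = (PySem.Dict.empty, d, P) := by
  cases f with
  | zero => rfl
  | succ f => rw [goA_succ, if_pos h]

-- the measure: Σ over not-yet-processed keys of (value length + 1); it bounds both
-- A's recursion depth and the number of steps B's machine still takes
def nu (d : PySem.Dict String (List String)) (P : PySem.Set String) : Nat :=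
  (((d.keys).filter (fun k => !(PySem.Set.contains P k))).map
    (fun k => (d.getD k []).length + 1)).sum

-- what B's machine does to the frame below a finished node (descendant set `all`)
def popCont : List (String × List String × List String) → List String →
    List (String × List String × List String)
  | [], _ => []
  | (pn, pk, pa) :: fs', all => (pn, pk, PySem.Set.update pa all) :: fs'

-- the induction statement: one guard-passing call of A's recursion, its cost `c`
-- in machine steps of B, and the state facts every caller needs
def MainStmt (fA : Nat) : Prop :=
  ∀ (d : PySem.Dict String (List String)) (root : String) (P : PySem.Set String),
    d.keys.Nodup →
    (∀ k, k ∉ P → (d.getD k []).Pairwise (fun a b => a ≤ b)) →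
    root ∉ P → d.contains root = true →
    nu d P < fA →
    ∃ (all : List String) (c : Nat),
      (goA fA d root P).1 = (goA fA d root P).2.1 ∧
      (goA fA d root P).2.1.get? root = some all ∧
      (goA fA d root P).2.1.keys = d.keys ∧
      (∀ x, x ∈ P → x ∈ (goA fA d root P).2.2) ∧
      root ∈ (goA fA d root P).2.2 ∧
      (∀ k, k ∉ (goA fA d root P).2.2 →
        (goA fA d root P).2.1.getD k [] = d.getD k []) ∧
      c + nu (goA fA d root P).2.1 (goA fA d root P).2.2 ≤ nu d P ∧
      ∀ (fb : Nat) (fs : List (String × List String × List String)),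
        goB (c + fb)
          ((root, PySem.List.sorted (d.getD root []) (fun x => x) false,
            PySem.Set.ofList (d.getD root [])) :: fs) d (PySem.Set.add P root)
        = goB fb (popCont fs all) (goA fA d root P).2.1 (goA fA d root P).2.2

lemma goB_nil (f : Nat) (d : PySem.Dict String (List String)) (P : PySem.Set String) :
    goB f [] d P = (d, P) := by cases f <;> rfl

lemma goB_skip (f : Nat) (node : String) (x : String) (ks acc : List String) (fs)
    (d : PySem.Dict String (List String)) (P : PySem.Set String)
    (h : (!(PySem.Set.contains P x) && d.contains x) = false) :
    goB (f+1) ((node, x :: ks, acc) :: fs) d P = goB f ((node, ks, acc) :: fs) d P := by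
  simp only [goB]
  rw [h]
  simp

lemma goB_push (f : Nat) (node : String) (x : String) (ks acc : List String) (fs)
    (d : PySem.Dict String (List String)) (P : PySem.Set String)
    (h1 : x ∉ P) (h2 : d.contains x = true) :
    goB (f+1) ((node, x :: ks, acc) :: fs) d P =
      goB f ((x, PySem.List.sorted (d.getD x []) (fun x => x) false,
              PySem.Set.ofList (d.getD x [])) :: (node, ks, acc) :: fs) d
        (PySem.Set.add P x) := by
  simp [goB, h1, h2]

lemma goB_pop (f : Nat) (node : String) (acc : List String) (fs)
    (d : PySem.Dict String (List String)) (P : PySem.Set String) :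
    goB (f+1) ((node, [], acc) :: fs) d P =
      goB f (popCont fs acc) (d.insert node acc) P := by
  cases fs with
  | nil => simp [goB, popCont]
  | cons fr fs' => obtain ⟨pn, pk, pa⟩ := fr; simp [goB, popCont]

lemma nu_insert (d : PySem.Dict String (List String)) (P : PySem.Set String)
    (r : String) (v : List String) (hc : d.contains r = true) (hP : r ∈ P) :
    nu (d.insert r v) P = nu d P := by
  unfold nu
  rw [PySem.Dict.keys_insert_of_contains d v hc]
  congr 1
  apply List.map_congr_left
  intro k hk
  have hkP : k ∉ P := by
    have := List.of_mem_filter hk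
    simpa using this
  have hkr : k ≠ r := fun h => hkP (h ▸ hP)
  rw [PySem.Dict.getD_insert_of_ne d v [] hkr]

lemma sum_filter_add (f : String → Nat) (P : PySem.Set String) (r : String)
    (hP : r ∉ P) :
    ∀ (l : List String), l.Nodup → r ∈ l →
      ((l.filter (fun k => !(PySem.Set.contains (PySem.Set.add P r) k))).map f).sum + f r
        = ((l.filter (fun k => !(PySem.Set.contains P k))).map f).sum := by
  intro l
  induction l with
  | nil => intro _ h; cases h
  | cons a t ih =>
    intro hnd hmem
    have hnd' : t.Nodup := (List.nodup_cons.mp hnd).2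
    by_cases har : a = r
    · subst har
      have hat : a ∉ t := (List.nodup_cons.mp hnd).1
      have hmemadd : a ∈ PySem.Set.add P a := by
        rw [PySem.Set.mem_add]; right; rfl
      have e1 : t.filter (fun k => !(PySem.Set.contains (PySem.Set.add P a) k))
          = t.filter (fun k => !(PySem.Set.contains P k)) := by
        apply List.filter_congr
        intro k hk
        have hka : ¬ k = a := fun h => hat (h ▸ hk)
        simp [PySem.Set.mem_add, hka]
      rw [List.filter_cons, List.filter_cons, if_neg (by simp [hmemadd]),
        if_pos (by simp [hP]), e1, List.map_cons, List.sum_cons]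
      omega
    · have hmem' : r ∈ t := by
        rcases List.mem_cons.mp hmem with h | h
        · exact absurd h.symm har
        · exact h
      have hca : (a ∈ PySem.Set.add P r) ↔ (a ∈ P) := by
        rw [PySem.Set.mem_add]
        constructor
        · rintro (h | h)
          · exact h
          · exact absurd h har
        · intro h; left; exact h
      by_cases hPa : a ∈ P
      · rw [List.filter_cons, List.filter_cons, if_neg (by simp [hca.mpr hPa]),
          if_neg (by simp [hPa])]
        exact ih hnd' hmem'
      · have hPa' : a ∉ PySem.Set.add P r := fun h => hPa (hca.mp h)
        rw [List.filter_cons, List.filter_cons, if_pos (by simp [hPa']),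
          if_pos (by simp [hPa]), List.map_cons, List.map_cons, List.sum_cons,
          List.sum_cons]
        have := ih hnd' hmem'
        omega

lemma nu_add (d : PySem.Dict String (List String)) (P : PySem.Set String) (r : String)
    (hmem : r ∈ d.keys) (hnd : d.keys.Nodup) (hP : r ∉ P) :
    nu d (PySem.Set.add P r) + ((d.getD r []).length + 1) = nu d P := by
  unfold nu
  exact sum_filter_add _ P r hP d.keys hnd hmem

lemma sum_map_filter_le (l : List String) (f : String → Nat) (p : String → Bool) :
    ((l.filter p).map f).sum ≤ (l.map f).sum := by
  induction l with
  | nil => simp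
  | cons a t ih =>
    by_cases h : p a = true
    · rw [List.filter_cons, if_pos h, List.map_cons, List.map_cons, List.sum_cons,
        List.sum_cons]
      omega
    · rw [List.filter_cons, if_neg h, List.map_cons, List.sum_cons]
      omega

lemma nu_le_sum (d : PySem.Dict String (List String)) (P : PySem.Set String)
    (hnd : d.keys.Nodup) :
    nu d P ≤ (d.items.map (fun p => p.2.length + 1)).sum := by
  unfold nu
  rw [PySem.Dict.items_eq_map_keys d hnd [], List.map_map]
  exact sum_map_filter_le d.keys _ _

lemma pvFuel_eq (decs : List (String × List String)) :
    pvFuel decs = 1 + (decs.map (fun p => p.2.length + 1)).sum := by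
  unfold pvFuel
  have h : ∀ (l : List (String × List String)) (a : Nat),
      l.foldl (fun n p => n + (p.2.length + 1)) a
        = a + (l.map (fun p => p.2.length + 1)).sum := by
    intro l
    induction l with
    | nil => simp
    | cons x t ih => intro a; simp [ih, Nat.add_assoc]
  exact h decs 1

lemma loopA (fA' : Nat) (IH : MainStmt fA')
    (d0 : PySem.Dict String (List String)) (P0 : PySem.Set String)
    (hnd0 : d0.keys.Nodup)
    (hs0 : ∀ k, k ∉ P0 → (d0.getD k []).Pairwise (fun a b => a ≤ b)) :
    ∀ (kids : List String) (all : PySem.Set String)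
      (d : PySem.Dict String (List String)) (P : PySem.Set String),
      d.keys = d0.keys →
      (∀ x, x ∈ P0 → x ∈ P) →
      (∀ k, k ∉ P → d.getD k [] = d0.getD k []) →
      nu d P < fA' →
      ∃ c : Nat,
        (kids.foldl (stepA fA') (all, d, P)).2.1.keys = d0.keys ∧
        (∀ x, x ∈ P → x ∈ (kids.foldl (stepA fA') (all, d, P)).2.2) ∧
        (∀ k, k ∉ (kids.foldl (stepA fA') (all, d, P)).2.2 →
          (kids.foldl (stepA fA') (all, d, P)).2.1.getD k [] = d0.getD k []) ∧
        c + nu (kids.foldl (stepA fA') (all, d, P)).2.1 (kids.foldl (stepA fA') (all, d, P)).2.2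
          ≤ kids.length + nu d P ∧
        ∀ (fb : Nat) (fs : List (String × List String × List String)) (node : String),
          goB (c + fb) ((node, kids, all) :: fs) d P
            = goB fb ((node, [], (kids.foldl (stepA fA') (all, d, P)).1) :: fs)
                (kids.foldl (stepA fA') (all, d, P)).2.1
                (kids.foldl (stepA fA') (all, d, P)).2.2 := by
  intro kids
  induction kids with
  | nil =>
    intro all d P hkeys hmono hunch hfuel
    exact ⟨0, hkeys, fun x h => h, hunch, by simp,
      by intro fb fs node; rw [Nat.zero_add]; rfl⟩
  | cons x ks ih =>
    intro all d P hkeys hmono hunch hfuel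
    by_cases hPx : x ∈ P
    · -- child already processed: skipped by both
      have hstep : stepA fA' (all, d, P) x = (all, d, P) := by simp [stepA, hPx]
      rw [List.foldl_cons, hstep]
      obtain ⟨c, h1, h2, h3, h4, h5⟩ := ih all d P hkeys hmono hunch hfuel
      refine ⟨c + 1, h1, h2, h3, ?_, ?_⟩
      · simp only [List.length_cons]; omega
      · intro fb fs node
        have harith : c + 1 + fb = (c + fb) + 1 := by omega
        have hg : (!(PySem.Set.contains P x) && d.contains x) = false := by
          simp [hPx]
        rw [harith, goB_skip _ _ _ _ _ _ _ _ hg, h5 fb fs node]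
    · by_cases hCx : d.contains x = true
      · -- child recursed into
        have hndd : d.keys.Nodup := by rw [hkeys]; exact hnd0
        have hsd : ∀ k, k ∉ P → (d.getD k []).Pairwise (fun a b => a ≤ b) := by
          intro k hk
          have hk0 : k ∉ P0 := fun h => hk (hmono k h)
          rw [hunch k hk]
          exact hs0 k hk0
        obtain ⟨allx, cx, e1, e2, e3, e4, e5, e6, e7, e8⟩ :=
          IH d x P hndd hsd hPx hCx hfuel
        have hget : ((goA fA' d x P).1.get? x) = some allx := by rw [e1]; exact e2
        have hstep : stepA fA' (all, d, P) x =
            (PySem.Set.update all allx, (goA fA' d x P).2.1, (goA fA' d x P).2.2) := by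
          simp [stepA, hPx, hget]
        rw [List.foldl_cons, hstep]
        have hkeys' : (goA fA' d x P).2.1.keys = d0.keys := by rw [e3, hkeys]
        have hmono' : ∀ y, y ∈ P0 → y ∈ (goA fA' d x P).2.2 :=
          fun y hy => e4 y (hmono y hy)
        have hunch' : ∀ k, k ∉ (goA fA' d x P).2.2 →
            (goA fA' d x P).2.1.getD k [] = d0.getD k [] := by
          intro k hk
          have hkP : k ∉ P := fun h => hk (e4 k h)
          rw [e6 k hk, hunch k hkP]
        have hfuel' : nu (goA fA' d x P).2.1 (goA fA' d x P).2.2 < fA' := by omega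
        obtain ⟨c, h1, h2, h3, h4, h5⟩ :=
          ih (PySem.Set.update all allx) (goA fA' d x P).2.1 (goA fA' d x P).2.2
            hkeys' hmono' hunch' hfuel'
        refine ⟨cx + c + 1, h1, ?_, h3, ?_, ?_⟩
        · intro y hy; exact h2 y (e4 y hy)
        · simp only [List.length_cons]; omega
        · intro fb fs node
          have harith : cx + c + 1 + fb = (cx + (c + fb)) + 1 := by omega
          rw [harith, goB_push _ _ _ _ _ _ _ _ hPx hCx,
            e8 (c + fb) ((node, ks, all) :: fs)]
          exact h5 fb fs node
      · -- child not a key: A's inner call returns {}, B skips it as a leaf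
        have hCx' : d.contains x = false := by
          cases h : d.contains x
          · rfl
          · exact absurd h hCx
        have hguardx : (PySem.Set.contains P x || !(d.contains x)) = true := by
          simp [hCx']
        have hstep : stepA fA' (all, d, P) x = (all, d, P) := by
          rw [stepA, if_neg (by simp [hPx]), goA_stop fA' d x P hguardx]
          simp [PySem.Dict.get?_empty, PySem.Set.update_nil]
        rw [List.foldl_cons, hstep]
        obtain ⟨c, h1, h2, h3, h4, h5⟩ := ih all d P hkeys hmono hunch hfuel
        refine ⟨c + 1, h1, h2, h3, ?_, ?_⟩
        · simp only [List.length_cons]; omega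
        · intro fb fs node
          have harith : c + 1 + fb = (c + fb) + 1 := by omega
          have hg : (!(PySem.Set.contains P x) && d.contains x) = false := by
            simp [hCx']
          rw [harith, goB_skip _ _ _ _ _ _ _ _ hg, h5 fb fs node]

lemma mainA : ∀ fA, MainStmt fA := by
  intro fA
  unfold MainStmt
  induction fA with
  | zero => intro d root P _ _ _ _ hf; exact absurd hf (Nat.not_lt_zero _)
  | succ fA' ihA =>
    intro d root P hnd hs hPr hCr hf
    have hrootmem : root ∈ d.keys := (PySem.Dict.contains_iff_mem_keys ..).mp hCr
    have hguard : (PySem.Set.contains P root || !(d.contains root)) = false := by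
      simp [hPr, hCr]
    rw [goA_succ fA' d root P, hguard]
    rw [if_neg Bool.false_ne_true]
    set F := (d.getD root []).foldl (stepA fA')
      (PySem.Set.ofList (d.getD root []), d, PySem.Set.add P root) with hF
    have hs0' : ∀ k, k ∉ PySem.Set.add P root →
        (d.getD k []).Pairwise (fun a b => a ≤ b) := by
      intro k hk
      exact hs k (fun h => hk (by rw [PySem.Set.mem_add]; left; exact h))
    have hnuadd : nu d (PySem.Set.add P root) + ((d.getD root []).length + 1) = nu d P :=
      nu_add d P root hrootmem hnd hPr
    have hfuel' : nu d (PySem.Set.add P root) < fA' := by omega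
    obtain ⟨cL, h1, h2, h3, h4, h5⟩ := loopA fA' ihA d (PySem.Set.add P root) hnd hs0'
      (d.getD root []) (PySem.Set.ofList (d.getD root [])) d (PySem.Set.add P root)
      rfl (fun x h => h) (fun k _ => rfl) hfuel'
    rw [← hF] at h1 h2 h3 h4 h5
    have hFc : F.2.1.contains root = true := by
      rw [PySem.Dict.contains_iff_mem_keys, h1]
      exact hrootmem
    have hrootP' : root ∈ F.2.2 :=
      h2 root (by rw [PySem.Set.mem_add]; right; rfl)
    refine ⟨F.1, cL + 1, rfl, PySem.Dict.get?_insert_self .., ?_, ?_, hrootP', ?_, ?_, ?_⟩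
    · rw [PySem.Dict.keys_insert_of_contains F.2.1 F.1 hFc, h1]
    · intro y hy
      exact h2 y (by rw [PySem.Set.mem_add]; left; exact hy)
    · intro k hk
      have hkr : k ≠ root := fun h => hk (h ▸ hrootP')
      rw [PySem.Dict.getD_insert_of_ne F.2.1 F.1 [] hkr, h3 k hk]
    · have hni : nu (F.2.1.insert root F.1) F.2.2 = nu F.2.1 F.2.2 :=
        nu_insert F.2.1 F.2.2 root F.1 hFc hrootP'
      rw [hni]
      omega
    · intro fb fs
      have hsort : PySem.List.sorted (d.getD root []) (fun x => x) false = d.getD root [] :=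
        PySem.List.sorted_eq_self_of_pairwise _ _ (hs root hPr)
      have harith : cL + 1 + fb = cL + (fb + 1) := by omega
      rw [harith, hsort, h5 (fb + 1) fs root, goB_pop]

theorem pv_top :
    ∀ (decs : List (String × List String)) (root : String) (processed : Option (List String)),
      Pre_redundantize_decs decs root processed →
      redundantize_decs decs root processed = redundantize_decs_alt decs root processed := by
  intro decs root processed hpre
  by_cases htriv : (PySem.Set.contains ((processed.getD [] : List String)) root
      || !((PySem.Dict.mk decs).contains root)) = true
  · unfold redundantize_decs redundantize_decs_alt
    rw [goA_stop _ _ _ _ htriv, if_pos htriv]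
    rfl
  · have hcond : (PySem.Set.contains ((processed.getD [] : List String)) root
        || !((PySem.Dict.mk decs).contains root)) = false := by
      cases h : (PySem.Set.contains ((processed.getD [] : List String)) root
        || !((PySem.Dict.mk decs).contains root))
      · rfl
      · exact absurd h htriv
    have hCr : (PySem.Dict.mk decs).contains root = true := by
      cases h : (PySem.Dict.mk decs).contains root
      · rw [h] at hcond
        simp at hcond
      · rfl
    have hPr : root ∉ (processed.getD [] : List String) := by
      intro hmem
      have hc : PySem.Set.contains ((processed.getD [] : List String)) root = true := by
        simpa using hmem
      rw [hc] at hcond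
      simp at hcond
    have hrootk : root ∈ decs.map Prod.fst := by
      have := (PySem.Dict.contains_iff_mem_keys ..).mp hCr
      simpa [PySem.Dict.keys] using this
    rcases hpre with htr | ⟨hnd, hrest⟩
    · rcases htr with h | h
      · exact absurd h hPr
      · exact absurd hrootk h
    · have hndk : (PySem.Dict.mk decs).keys.Nodup := by
        simpa [PySem.Dict.keys] using hnd
      have hsall : ∀ k, k ∉ (processed.getD [] : List String) →
          ((PySem.Dict.mk decs).getD k []).Pairwise (fun a b => a ≤ b) := by
        intro k _
        rw [PySem.Dict.getD_eq_get?_getD]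
        cases hg : (PySem.Dict.mk decs).get? k with
        | none => exact List.Pairwise.nil
        | some v =>
          have hmi : (k, v) ∈ (PySem.Dict.mk decs).items :=
            PySem.Dict.mem_items_of_get?_eq_some _ hg
          exact ((hrest (k, v) hmi).1).imp (fun h => String.le_iff_toList_le.mpr h)
      have hfuel : nu (PySem.Dict.mk decs) (processed.getD []) < pvFuel decs := by
        have hle : nu (PySem.Dict.mk decs) (processed.getD [])
            ≤ (decs.map (fun p => p.2.length + 1)).sum :=
          nu_le_sum (PySem.Dict.mk decs) (processed.getD []) hndk
        have heq := pvFuel_eq decs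
        omega
      obtain ⟨all, c, e1, e2, e3, e4, e5, e6, e7, e8⟩ :=
        mainA (pvFuel decs) (PySem.Dict.mk decs) root (processed.getD [])
          hndk hsall hPr hCr hfuel
      have hcle : c ≤ pvFuel decs := by omega
      unfold redundantize_decs redundantize_decs_alt
      rw [if_neg (by rw [hcond]; exact Bool.false_ne_true)]
      have hsplit : pvFuel decs = c + (pvFuel decs - c) := by omega
      conv_rhs => rw [hsplit]
      rw [e8 (pvFuel decs - c) []]
      simp only [popCont]
      rw [goB_nil, e1]

-- ===== VERDICT (by name: the statement is the Claim_ definition above) =====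
theorem redundantize_decs_spec : Claim_equal_redundantize_decs := by
  intro decs root processed _ hpre
  exact pv_top decs root processed hpre
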